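-- pv_equiv track=rewrite | github.com/DrewThomas09/RCM | RCM_MC/rcm_mc/diligence/regulatory/packet.py | worst_band
-- ===== SOURCE A (Python) =====
-- from enum import Enum
-- from typing import Any, Dict, List, Optional
--
-- class RegulatoryBand(str, Enum):
--     """Traffic-light banding reused across submodules."""
--     GREEN   = "GREEN"
--     YELLOW  = "YELLOW"
--     RED     = "RED"
--     UNKNOWN = "UNKNOWN"
--
-- def worst_band(bands: List[RegulatoryBand]) -> RegulatoryBand:
--     """Return the worst-of bands. UNKNOWN defers to any real band;
--     only when ALL inputs are UNKNOWN do we return UNKNOWN."""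
--     if not bands:
--         return RegulatoryBand.UNKNOWN
--     order = [RegulatoryBand.RED, RegulatoryBand.YELLOW,
--              RegulatoryBand.GREEN]
--     for tier in order:
--         if any(b == tier for b in bands):
--             return tier
--     return RegulatoryBand.UNKNOWN
-- ===== SOURCE B (Python) =====
-- def worst_band(bands):
--     """Single accumulating pass: keep the lowest-severity-rank band seen;
--     UNKNOWN (rank 3) is the initial/default, so it covers empty and all-unknown."""
--     rank = {"RED": 0, "YELLOW": 1, "GREEN": 2}
--     best, best_r = "UNKNOWN", 3
--     for b in bands:
--         r = rank.get(b, 3)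
--         if r < best_r:
--             best, best_r = b, r
--     return best
-- ===== Notes on version B (the rewrite author's own statement) =====
-- stated objective: alternative
-- what changed: Replaced A's three sequential any()-scans over a priority list with one accumulating pass that keeps the band of strictly lowest severity rank, starting from UNKNOWN.
import Mathlib
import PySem

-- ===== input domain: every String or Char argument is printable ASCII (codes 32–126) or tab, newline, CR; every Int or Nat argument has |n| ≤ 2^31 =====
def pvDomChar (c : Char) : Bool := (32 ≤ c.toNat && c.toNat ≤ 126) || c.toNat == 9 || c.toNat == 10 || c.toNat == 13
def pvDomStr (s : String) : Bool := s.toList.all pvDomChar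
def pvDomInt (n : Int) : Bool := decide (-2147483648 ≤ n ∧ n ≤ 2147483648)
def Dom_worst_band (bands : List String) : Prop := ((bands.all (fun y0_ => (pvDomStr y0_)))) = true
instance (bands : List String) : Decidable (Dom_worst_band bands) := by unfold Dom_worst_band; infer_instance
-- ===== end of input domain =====

-- B replaces A's three sequential any()-scans over a priority list with one
-- accumulating pass keeping the band of strictly lowest severity rank (alternative decomposition).

-- ===== PORT A =====
-- 'for tier in order: if any(b == tier for b in bands): return tier' = first tier with a match
def worst_band (bands : List String) : String :=
  if bands = [] then "UNKNOWN"
  else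
    match (["RED", "YELLOW", "GREEN"].find? (fun tier => bands.any (fun b => b == tier))) with
    | some t => t
    | none => "UNKNOWN"

-- ===== PORT B =====
-- rank.get(b, 3) of B's literal three-entry dict
def pvRank (b : String) : Nat :=
  if b = "RED" then 0 else if b = "YELLOW" then 1 else if b = "GREEN" then 2 else 3

def worst_band_alt (bands : List String) : String :=
  (bands.foldl
    (fun (acc : String × Nat) b =>
      let r := pvRank b
      if r < acc.2 then (b, r) else acc)
    ("UNKNOWN", 3)).1

-- ===== PRECONDITION & SPEC =====
def Spec_worst_band (bands : List String) (out : String) : Prop := out = worst_band_alt bands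
instance (bands : List String) (out : String) : Decidable (Spec_worst_band bands out) := by unfold Spec_worst_band; infer_instance

-- ===== CLAIM (what is proved, stated in full; the proofs are below) =====
def Claim_equal_worst_band : Prop := ∀ (bands : List String), Dom_worst_band bands → Spec_worst_band bands (worst_band bands)

-- ===== LEMMAS AND PROOFS =====

-- canonical band string of a severity rank
def pvG (r : Nat) : String :=
  if r = 0 then "RED" else if r = 1 then "YELLOW" else if r = 2 then "GREEN" else "UNKNOWN"

-- rank-minimum of a list from initial rank r
def pvM (r : Nat) (xs : List String) : Nat :=
  xs.foldl (fun a b => min a (pvRank b)) r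

theorem pvM_cons (r : Nat) (b : String) (xs : List String) :
    pvM r (b :: xs) = pvM (min r (pvRank b)) xs := rfl

theorem pvRank_le_three (b : String) : pvRank b ≤ 3 := by
  unfold pvRank; split_ifs <;> omega

theorem pvG_of_rank {b : String} {r : Nat} (h : pvRank b = r) (hr : r < 3) : pvG r = b := by
  unfold pvRank at h
  split_ifs at h with h0 h1 h2
  · subst h0; rw [← h]; rfl
  · subst h1; rw [← h]; rfl
  · subst h2; rw [← h]; rfl
  · omega

theorem fold_canon (xs : List String) : ∀ (r : Nat), r ≤ 3 →
    xs.foldl (fun (acc : String × Nat) b =>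
      let r := pvRank b
      if r < acc.2 then (b, r) else acc) (pvG r, r) = (pvG (pvM r xs), pvM r xs) := by
  induction xs with
  | nil => intro r _; rfl
  | cons b xs ih =>
    intro r hr
    simp only [List.foldl_cons, pvM_cons]
    by_cases h : pvRank b < r
    · have hb : pvG (pvRank b) = b := pvG_of_rank rfl (by omega)
      have hmin : min r (pvRank b) = pvRank b := by omega
      rw [hmin]
      simpa [h, hb] using ih (pvRank b) (pvRank_le_three b)
    · have hmin : min r (pvRank b) = r := by omega
      rw [hmin]
      simpa [h] using ih r hr

theorem pvM_le_init (xs : List String) : ∀ r, pvM r xs ≤ r := by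
  induction xs with
  | nil => intro r; exact le_refl r
  | cons b xs ih =>
    intro r
    rw [pvM_cons]
    exact le_trans (ih _) (by omega)

theorem pvM_le_of_mem {x : String} {xs : List String} (h : x ∈ xs) :
    ∀ r, pvM r xs ≤ pvRank x := by
  induction xs with
  | nil => cases h
  | cons b xs ih =>
    intro r
    rw [pvM_cons]
    rcases List.mem_cons.mp h with rfl | hmem
    · exact le_trans (pvM_le_init _ _) (min_le_right _ _)
    · exact ih hmem _
theorem le_pvM {c : Nat} (xs : List String) (hall : ∀ x ∈ xs, c ≤ pvRank x) :
    ∀ r, c ≤ r → c ≤ pvM r xs := by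
  induction xs with
  | nil => intro r hr; exact hr
  | cons b xs ih =>
    intro r hr
    rw [pvM_cons]
    exact ih (fun x hx => hall x (List.mem_cons_of_mem _ hx)) _
      (le_min hr (hall b (List.mem_cons_self)))

theorem rank_pos_of_ne_red {b : String} (h : b ≠ "RED") : 1 ≤ pvRank b := by
  unfold pvRank
  split_ifs with h0 _ _ <;> first | exact absurd h0 h | omega

theorem rank_ge_two {b : String} (h1 : b ≠ "RED") (h2 : b ≠ "YELLOW") : 2 ≤ pvRank b := by
  unfold pvRank
  split_ifs with g0 g1 _ <;> first | exact absurd g0 h1 | exact absurd g1 h2 | omega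

theorem rank_eq_three {b : String} (h1 : b ≠ "RED") (h2 : b ≠ "YELLOW") (h3 : b ≠ "GREEN") :
    pvRank b = 3 := by
  unfold pvRank
  split_ifs with g0 g1 g2 <;> first | exact absurd g0 h1 | exact absurd g1 h2 | exact absurd g2 h3 | rfl

theorem alt_eq_canon (bands : List String) : worst_band_alt bands = pvG (pvM 3 bands) := by
  unfold worst_band_alt
  have h := fold_canon bands 3 (le_refl 3)
  have hg : pvG 3 = "UNKNOWN" := rfl
  rw [← hg, h]

theorem worst_band_spec : Claim_equal_worst_band := by
  intro bands _
  unfold Spec_worst_band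
  rw [alt_eq_canon]
  unfold worst_band
  by_cases hR : "RED" ∈ bands
  · have hne : bands ≠ [] := by rintro rfl; cases hR
    have h0 : pvM 3 bands = 0 := Nat.le_zero.mp (by simpa [pvRank] using pvM_le_of_mem hR 3)
    have hRb : (bands.any fun b => b == "RED") = true := by
      simp only [List.any_eq_true, beq_iff_eq]; exact ⟨"RED", hR, rfl⟩
    simp [hne, List.find?, hRb, h0, pvG]
  · have h1 : ∀ x ∈ bands, 1 ≤ pvRank x := fun x hx =>
      rank_pos_of_ne_red (fun he => hR (he ▸ hx))
    have hRb : (bands.any fun b => b == "RED") = false := by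
      simp only [List.any_eq_false, beq_iff_eq]; exact fun x hx he => hR (he ▸ hx)
    by_cases hY : "YELLOW" ∈ bands
    · have hne : bands ≠ [] := by rintro rfl; cases hY
      have hle : pvM 3 bands ≤ 1 := by simpa [pvRank] using pvM_le_of_mem hY 3
      have hge : 1 ≤ pvM 3 bands := le_pvM bands h1 3 (by omega)
      have hm : pvM 3 bands = 1 := le_antisymm hle hge
      have hYb : (bands.any fun b => b == "YELLOW") = true := by
        simp only [List.any_eq_true, beq_iff_eq]; exact ⟨"YELLOW", hY, rfl⟩
      simp [hne, List.find?, hRb, hYb, hm, pvG]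
    · have hYb : (bands.any fun b => b == "YELLOW") = false := by
        simp only [List.any_eq_false, beq_iff_eq]; exact fun x hx he => hY (he ▸ hx)
      have h2 : ∀ x ∈ bands, 2 ≤ pvRank x := fun x hx =>
        rank_ge_two (fun he => hR (he ▸ hx)) (fun he => hY (he ▸ hx))
      by_cases hG : "GREEN" ∈ bands
      · have hne : bands ≠ [] := by rintro rfl; cases hG
        have hle : pvM 3 bands ≤ 2 := by simpa [pvRank] using pvM_le_of_mem hG 3
        have hge : 2 ≤ pvM 3 bands := le_pvM bands h2 3 (by omega)
        have hm : pvM 3 bands = 2 := le_antisymm hle hge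
        have hGb : (bands.any fun b => b == "GREEN") = true := by
          simp only [List.any_eq_true, beq_iff_eq]; exact ⟨"GREEN", hG, rfl⟩
        simp [hne, List.find?, hRb, hYb, hGb, hm, pvG]
      · have hGb : (bands.any fun b => b == "GREEN") = false := by
          simp only [List.any_eq_false, beq_iff_eq]; exact fun x hx he => hG (he ▸ hx)
        have h3 : ∀ x ∈ bands, pvRank x = 3 := fun x hx =>
          rank_eq_three (fun he => hR (he ▸ hx)) (fun he => hY (he ▸ hx)) (fun he => hG (he ▸ hx))
        have hm : pvM 3 bands = 3 :=
          le_antisymm (pvM_le_init bands 3) (le_pvM bands (fun x hx => (h3 x hx).ge) 3 (le_refl 3))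
        by_cases hne : bands = []
        · subst hne; rfl
        · simp [hne, List.find?, hRb, hYb, hGb, hm, pvG]
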